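-- pv_equiv track=rewrite | github.com/hosseinzamanlou/FlexiMoveLogistics | Deliverable/5-VRP-PythonCode.py | sweep_algorithm
-- ===== SOURCE A (Python) =====
-- def sweep_algorithm(polar_coordinates, num_trucks=1):
--     """Cluster customers using the Sweep Algorithm."""
--     clusters = [[] for _ in range(num_trucks)]
--     cluster_index = 0
--
--     for i, (customer_id, _) in enumerate(polar_coordinates):
--         if customer_id != 0:
--             clusters[cluster_index].append(customer_id)
--             cluster_index = (cluster_index + 1) % num_trucks
--
--     # Ensure all clusters start and end at the depot
--     for cluster in clusters:
--         cluster.insert(0, 0)  # Start from depot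
--         cluster.append(0)  # Return to depot
--     return clusters
-- ===== SOURCE B (Python) =====
-- def sweep_algorithm(polar_coordinates, num_trucks=1):
--     """Cluster customers using the Sweep Algorithm (strided-slice formulation)."""
--     customers = [cid for cid, _ in polar_coordinates if cid != 0]
--     return [[0] + customers[k::num_trucks] + [0] for k in range(num_trucks)]
-- ===== Notes on version B (the rewrite author's own statement) =====
-- stated objective: simpler
-- what changed: Replaces the counter-driven round-robin append loop over mutable cluster lists by one filter pass building the customer list plus an independent strided slice customers[k::num_trucks] per cluster.
import Mathlib
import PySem

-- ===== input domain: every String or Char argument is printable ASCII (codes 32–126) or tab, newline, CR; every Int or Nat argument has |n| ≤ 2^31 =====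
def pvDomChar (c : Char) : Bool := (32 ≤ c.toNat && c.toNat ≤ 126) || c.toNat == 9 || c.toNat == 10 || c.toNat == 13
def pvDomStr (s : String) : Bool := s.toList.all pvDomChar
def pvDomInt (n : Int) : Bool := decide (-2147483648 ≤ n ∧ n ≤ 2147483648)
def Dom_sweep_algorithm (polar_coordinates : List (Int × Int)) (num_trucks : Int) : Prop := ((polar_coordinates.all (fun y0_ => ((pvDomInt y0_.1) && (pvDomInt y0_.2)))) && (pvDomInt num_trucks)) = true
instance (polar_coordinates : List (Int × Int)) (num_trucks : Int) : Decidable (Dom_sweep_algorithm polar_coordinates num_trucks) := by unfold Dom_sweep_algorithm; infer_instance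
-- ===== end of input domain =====

-- B replaces A's counter-driven round-robin append loop by a filter pass plus one
-- strided slice customers[k::num_trucks] per cluster (objective: simpler).

-- ===== PORT A =====
-- the for-loop over polar_coordinates carrying (clusters, cluster_index);
-- clusters[cluster_index].append(cid) is List.modify (in-range whenever Pre_ holds;
-- out of range Python raises IndexError, excluded by Pre_), and
-- (cluster_index + 1) % num_trucks is PySem.Int.mod.
def sweepLoop (pcs : List (Int × Int)) (n : Int) (clusters : List (List Int)) (idx : Int) :
    List (List Int) × Int :=
  match pcs with
  | [] => (clusters, idx)
  | (cid, _) :: rest =>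
    if cid ≠ 0 then
      sweepLoop rest n (clusters.modify idx.toNat (fun c => c ++ [cid])) (PySem.Int.mod (idx + 1) n)
    else
      sweepLoop rest n clusters idx

def sweep_algorithm (polar_coordinates : List (Int × Int)) (num_trucks : Int) : List (List Int) :=
  -- clusters = [[] for _ in range(num_trucks)]
  let clusters := List.replicate num_trucks.toNat ([] : List Int)
  let r := sweepLoop polar_coordinates num_trucks clusters 0
  -- for cluster in clusters: cluster.insert(0, 0); cluster.append(0)
  r.1.map (fun c => 0 :: (c ++ [0]))

-- ===== PORT B =====
def sweep_algorithm_alt (polar_coordinates : List (Int × Int)) (num_trucks : Int) : List (List Int) :=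
  -- customers = [cid for cid, _ in polar_coordinates if cid != 0]
  let customers := (polar_coordinates.filter (fun p => p.1 ≠ 0)).map (fun p => p.1)
  -- [[0] + customers[k::num_trucks] + [0] for k in range(num_trucks)]
  -- (customers[k::num_trucks] = slice?; the step num_trucks is nonzero whenever the
  -- range is nonempty, so getD [] is never the raising case)
  (PySem.List.pyRange 0 num_trucks 1).map (fun k =>
    0 :: ((PySem.List.slice? customers (some k) none num_trucks).getD []) ++ [0])

-- ===== PRECONDITION & SPEC =====
-- Pre_ excludes exactly the inputs where A raises: num_trucks ≤ 0 with some nonzero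
-- customer id makes clusters empty, so clusters[0].append raises IndexError.
def Pre_sweep_algorithm (polar_coordinates : List (Int × Int)) (num_trucks : Int) : Prop :=
  1 ≤ num_trucks ∨ ∀ p ∈ polar_coordinates, p.1 = 0
instance (polar_coordinates : List (Int × Int)) (num_trucks : Int) : Decidable (Pre_sweep_algorithm polar_coordinates num_trucks) := by unfold Pre_sweep_algorithm; infer_instance
def pvWitness_sweep_algorithm : (List (Int × Int)) × Int := ([(1, 10), (2, 20), (3, 30)], 2)

def Spec_sweep_algorithm (polar_coordinates : List (Int × Int)) (num_trucks : Int) (out : List (List Int)) : Prop := out = sweep_algorithm_alt polar_coordinates num_trucks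
instance (polar_coordinates : List (Int × Int)) (num_trucks : Int) (out : List (List Int)) : Decidable (Spec_sweep_algorithm polar_coordinates num_trucks out) := by unfold Spec_sweep_algorithm; infer_instance

-- ===== CLAIM (what is proved, stated in full; the proofs are below) =====
def Claim_equal_sweep_algorithm : Prop := ∀ (polar_coordinates : List (Int × Int)) (num_trucks : Int), Dom_sweep_algorithm polar_coordinates num_trucks → Pre_sweep_algorithm polar_coordinates num_trucks → Spec_sweep_algorithm polar_coordinates num_trucks (sweep_algorithm polar_coordinates num_trucks)
-- ===== LEMMAS AND PROOFS =====

-- the nonzero customer ids, in order (B's `customers` list)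
def custIds (pcs : List (Int × Int)) : List Int :=
  (pcs.filter (fun p => p.1 ≠ 0)).map (fun p => p.1)

-- every (g+1)-th element: takeStride xs g = xs[::g+1]
def takeStride : List Int → Nat → List Int
  | [], _ => []
  | x :: rest, g => x :: takeStride (rest.drop g) g
  termination_by xs _ => xs.length
  decreasing_by simp

-- the sublist of cs that A's round-robin loop, with counter starting at i, puts into cluster j
def assign : List Int → Nat → Nat → Nat → List Int
  | [], _, _, _ => []
  | c :: cs, i, j, N => (if i = j then [c] else []) ++ assign cs ((i + 1) % N) j N

theorem sweepLoop_length (pcs : List (Int × Int)) (n : Int) (clusters : List (List Int)) (idx : Int) :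
    ((sweepLoop pcs n clusters idx).1).length = clusters.length := by
  induction pcs generalizing clusters idx with
  | nil => rfl
  | cons p rest ih =>
    obtain ⟨cid, θ⟩ := p
    by_cases h : cid = 0 <;> simp [sweepLoop, h, ih, List.length_modify]

theorem sweepLoop_getElem? (pcs : List (Int × Int)) (N : Nat) (hN : 1 ≤ N)
    (clusters : List (List Int)) (i j : Nat) (hi : i < N) (hj : j < N)
    (hlen : clusters.length = N) :
    ((sweepLoop pcs (N : Int) clusters (i : Int)).1)[j]? =
      some ((clusters[j]?.getD []) ++ assign (custIds pcs) i j N) := by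
  induction pcs generalizing clusters i with
  | nil => simp [sweepLoop, custIds, assign, hlen.symm ▸ hj]
  | cons p rest ih =>
    obtain ⟨cid, θ⟩ := p
    by_cases h : cid = 0
    · have : custIds ((cid, θ) :: rest) = custIds rest := by simp [custIds, h]
      simp only [sweepLoop, h, ne_eq, not_true_eq_false, ite_false]
      exact ih clusters i hi hlen
    · have hc : custIds ((cid, θ) :: rest) = cid :: custIds rest := by simp [custIds, h]
      have hmod : PySem.Int.mod ((i : Int) + 1) (N : Int) = (((i + 1) % N : Nat) : Int) := by
        have := PySem.Int.mod_natCast (i + 1) N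
        push_cast at this ⊢
        exact this
      have htoNat : ((i : Int)).toNat = i := Int.toNat_natCast i
      simp only [sweepLoop, h, ne_eq, not_false_eq_true, if_pos, hmod, htoNat]
      rw [ih (clusters.modify i (fun c => c ++ [cid])) ((i + 1) % N)
        (Nat.mod_lt _ (by omega)) (by simp [List.length_modify, hlen])]
      rw [List.getElem?_modify]
      have hjlt : j < clusters.length := hlen.symm ▸ hj
      rw [List.getElem?_eq_getElem hjlt]
      by_cases hij : i = j <;>
        simp [hij, hc, assign, List.append_assoc]

theorem mod_lt_two_mul (x N : Nat) (h : x < 2 * N) : x % N = if x < N then x else x - N := by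
  split_ifs with hx
  · exact Nat.mod_eq_of_lt hx
  · rw [Nat.mod_eq_sub_mod (by omega)]
    exact Nat.mod_eq_of_lt (by omega)

theorem stride_mod_step (N i j : Nat) (hN : 1 ≤ N) (hi : i < N) (hj : j < N) :
    (N + j - ((i + 1) % N)) % N = if i = j then N - 1 else (N + j - i) % N - 1 := by
  have e1 : (i + 1) % N = if i + 1 < N then i + 1 else i + 1 - N := mod_lt_two_mul _ _ (by omega)
  rw [e1]
  have e2 : ∀ x, x ≤ N → (N + j - x) % N = if N + j - x < N then N + j - x else N + j - x - N :=
    fun x hx => mod_lt_two_mul _ _ (by omega)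
  rw [e2 _ (by split_ifs <;> omega), e2 _ (by omega)]
  split_ifs <;> omega

theorem assign_eq_takeStride (cs : List Int) (N i j : Nat) (hN : 1 ≤ N) (hi : i < N) (hj : j < N) :
    assign cs i j N = takeStride (cs.drop ((N + j - i) % N)) (N - 1) := by
  induction cs generalizing i with
  | nil => simp [assign, takeStride]
  | cons c cs ih =>
    have hstep := stride_mod_step N i j hN hi hj
    have hi' : (i + 1) % N < N := Nat.mod_lt _ (by omega)
    by_cases hij : i = j
    · subst hij
      have hd : (N + i - i) % N = 0 := by
        rw [Nat.add_sub_cancel]; exact Nat.mod_self N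
      rw [hd, List.drop_zero, takeStride]
      show (if i = i then [c] else []) ++ assign cs ((i + 1) % N) i N = _
      rw [if_pos rfl, ih _ hi']
      simp only [if_pos] at hstep
      rw [hstep]
      simp
    · have hd1 : 1 ≤ (N + j - i) % N := by
        rcases Nat.lt_or_ge (N + j - i) N with h | h
        · rw [Nat.mod_eq_of_lt h]; omega
        · rw [mod_lt_two_mul _ _ (by omega)]
          split_ifs <;> omega
      show (if i = j then [c] else []) ++ assign cs ((i + 1) % N) j N = _
      rw [if_neg hij, List.nil_append, ih _ hi', hstep, if_neg hij]
      have : (N + j - i) % N = ((N + j - i) % N - 1) + 1 := by omega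
      conv_rhs => rw [this, List.drop_succ_cons]

theorem stride_aux (N : Nat) (hN : 1 ≤ N) : ∀ (fuel : Nat) (ys : List Int), ys.length ≤ fuel →
    (List.range ((ys.length + N - 1) / N)).filterMap (fun t => ys[N * t]?) =
      takeStride ys (N - 1) := by
  intro fuel
  induction fuel with
  | zero =>
    intro ys hy
    have : ys = [] := List.eq_nil_of_length_eq_zero (by omega)
    subst this
    rw [show ([] : List Int).length + N - 1 = N - 1 by simp, Nat.div_eq_of_lt (by omega)]
    simp [takeStride]
  | succ f ih =>
    intro ys hy
    match ys with
    | [] =>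
      rw [show ([] : List Int).length + N - 1 = N - 1 by simp, Nat.div_eq_of_lt (by omega)]
      simp [takeStride]
    | y :: rest =>
      have hc1 : (y :: rest).length + N - 1 = rest.length + N := by
        rw [List.length_cons]; omega
      have hc2 : ((rest.drop (N - 1)).length + N - 1) / N = rest.length / N := by
        rw [List.length_drop]
        rcases Nat.lt_or_ge rest.length (N - 1) with h | h
        · rw [Nat.div_eq_of_lt (by omega), Nat.div_eq_of_lt (by omega)]
        · congr 1; omega
      rw [hc1, Nat.add_div_right _ (by omega), List.range_succ_eq_map, List.filterMap_cons]
      have hf0 : (y :: rest)[N * 0]? = some y := by simp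
      rw [hf0, List.filterMap_map]
      have hfs : ∀ t : Nat, ((fun t => (y :: rest)[N * t]?) ∘ Nat.succ) t =
          (rest.drop (N - 1))[N * t]? := by
        intro t
        have hdrop : rest.drop (N - 1) = (y :: rest).drop N := by
          conv_rhs => rw [show N = (N - 1) + 1 by omega, List.drop_succ_cons]
        rw [hdrop, List.getElem?_drop]
        simp [Nat.mul_succ, Nat.add_comm]
      rw [funext hfs, ← hc2,
        ih (rest.drop (N - 1)) (by rw [List.length_drop]; simp at hy; omega)]
      rw [takeStride]

theorem slice?_stride (xs : List Int) (k N : Nat) (hN : 1 ≤ N) :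
    (PySem.List.slice? xs (some (k : Int)) none (N : Int)).getD [] =
      takeStride (xs.drop k) (N - 1) := by
  have h0 : ¬((N : Int) = 0) := by omega
  have h1 : ¬((N : Int) < 0) := by omega
  have hk0 : ¬((k : Int) < 0) := by omega
  have hNpos : (0 : Int) < (N : Int) := by omega
  simp only [PySem.List.slice?, PySem.List.sliceIndices, h0, h1, hk0, hNpos, if_false, if_true,
    Option.getD]
  rcases Nat.lt_or_ge k xs.length with h | h
  · have hmin : min (k : Int) (xs.length : Int) = (k : Int) := by omega
    rw [hmin]
    have hlt : (k : Int) < (xs.length : Int) := by omega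
    rw [if_pos hlt]
    have hcast : ((xs.length : Int) - (k : Int) + (N : Int) - 1) / (N : Int) =
        (((xs.length - k + N - 1) / N : Nat) : Int) := by
      rw [show ((xs.length : Int) - k + N - 1) = ((xs.length - k + N - 1 : Nat) : Int) by omega]
      exact_mod_cast (Int.ofNat_ediv_ofNat ..).symm
    rw [hcast, Int.toNat_natCast]
    have hfs : ∀ t : Nat, xs[((k : Int) + (N : Int) * (t : Nat)).toNat]? =
        (xs.drop k)[N * t]? := by
      intro t
      rw [show ((k : Int) + (N : Int) * (t : Nat)) = ((k + N * t : Nat) : Int) by push_cast; ring,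
        Int.toNat_natCast, List.getElem?_drop]
    rw [funext hfs, show xs.length - k + N - 1 = (xs.drop k).length + N - 1 by
      rw [List.length_drop]]
    exact stride_aux N hN (xs.drop k).length (xs.drop k) le_rfl
  · -- k past the end: empty slice, empty drop
    have hmin : min (k : Int) (xs.length : Int) = (xs.length : Int) := by omega
    have hdrop : xs.drop k = [] := List.drop_eq_nil_of_le h
    simp [hmin, hdrop, takeStride]

theorem sweepLoop_all_zero (pcs : List (Int × Int)) (n : Int) (clusters : List (List Int))
    (idx : Int) (h : ∀ p ∈ pcs, p.1 = 0) :
    sweepLoop pcs n clusters idx = (clusters, idx) := by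
  induction pcs with
  | nil => rfl
  | cons p rest ih =>
    obtain ⟨cid, θ⟩ := p
    have h0 : cid = 0 := h (cid, θ) (by simp)
    simp [sweepLoop, h0]
    exact ih (fun p hp => h p (List.mem_cons_of_mem _ hp))

-- ===== VERDICT (by name: the statement is the Claim_ definition above) =====
theorem sweep_algorithm_spec : Claim_equal_sweep_algorithm := by
  intro pcs n _hDom hPre
  unfold Spec_sweep_algorithm
  by_cases hn : 1 ≤ n
  · -- num_trucks ≥ 1: the round-robin loop and the strided slices build the same clusters
    lift n to Nat using (by omega : 0 ≤ n) with N
    have hN : 1 ≤ N := by exact_mod_cast hn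
    simp only [sweep_algorithm, sweep_algorithm_alt]
    apply List.ext_getElem?
    intro j
    rw [List.getElem?_map, List.getElem?_map]
    have hlenA : ((sweepLoop pcs (N : Int) (List.replicate (N : Int).toNat []) 0).1).length = N := by
      rw [sweepLoop_length, List.length_replicate, Int.toNat_natCast]
    rcases Nat.lt_or_ge j N with hj | hj
    · have hA := sweepLoop_getElem? pcs N hN (List.replicate N ([] : List Int)) 0 j hN hj
        (by rw [List.length_replicate])
      have hmod0 : (N + j - 0) % N = j := by
        rw [Nat.sub_zero, Nat.add_mod_left]; exact Nat.mod_eq_of_lt hj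
      rw [Nat.cast_zero] at hA
      rw [Int.toNat_natCast] at hlenA ⊢
      rw [hA, List.getElem?_replicate, if_pos hj]
      rw [PySem.List.getElem?_pyRange_one, if_pos (by rw [Int.sub_zero, Int.toNat_natCast]; exact hj)]
      rw [Option.map_some, Option.map_some, Option.getD_some, List.nil_append]
      rw [assign_eq_takeStride _ N 0 j hN hN hj, hmod0]
      rw [Int.zero_add, slice?_stride _ j N hN]
      rfl
    · rw [Int.toNat_natCast] at hlenA ⊢
      have hlenB : (PySem.List.pyRange 0 (N : Int) 1).length ≤ j := by
        rw [PySem.List.length_pyRange_one, Int.sub_zero, Int.toNat_natCast]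
        omega
      rw [List.getElem?_eq_none (by omega), List.getElem?_eq_none hlenB]
      rfl
  · -- num_trucks ≤ 0 and (by Pre_) every id is 0: both return []
    have hz : ∀ p ∈ pcs, p.1 = 0 := by
      rcases hPre with h | h
      · omega
      · exact h
    simp only [sweep_algorithm, sweep_algorithm_alt]
    rw [sweepLoop_all_zero pcs n _ _ hz, PySem.List.pyRange_one_eq_nil (by omega : n ≤ 0)]
    rw [show n.toNat = 0 by omega]
    rfl
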